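-- pv_equiv track=rewrite | github.com/FreeRiverHouse/Onde | scripts/create-classic-epubs.py | split_jungle_chapters
-- ===== SOURCE A (Python) =====
-- def split_jungle_chapters(text):
--     """Split Jungle Book into stories using blank-line-surrounded titles."""
--     # The Jungle Book stories are separated by titles on their own lines
--     story_titles = [
--         "Mowgli's Brothers",
--         "Hunting-Song of the Seeonee Pack",
--         "Kaa's Hunting",
--         "Road-Song of the Bandar-Log",
--         "\"Tiger! Tiger!\"",
--         "Tiger! Tiger!",
--         "Mowgli's Song",
--         "The White Seal",
--         "Lukannon",
--         "\"Rikki-Tikki-Tavi\"",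
--         "Rikki-Tikki-Tavi",
--         "Darzee's Chaunt",
--         "Darzee's Chant",
--         "Toomai of the Elephants",
--         "Shiv and the Grasshopper",
--         "Her Majesty's Servants",
--         "Parade Song of the Camp Animals",
--         "Parade-Song of the Camp-Animals",
--     ]
--
--     # Find title positions
--     positions = []
--     for title in story_titles:
--         idx = text.find(f'\n{title}\n')
--         if idx != -1:
--             positions.append((idx, title))
--
--     positions.sort(key=lambda x: x[0])
--
--     if not positions:
--         # Fallback: single chapter
--         return [{'title': 'The Jungle Book', 'text': text}]
--
--     chapters = []
--     for i, (pos, title) in enumerate(positions):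
--         start = pos + len(title) + 2
--         end = positions[i+1][0] if i+1 < len(positions) else len(text)
--         body = text[start:end].strip()
--         if body:
--             chapters.append({'title': title.strip('"'), 'text': body})
--
--     return chapters
-- ===== SOURCE B (Python) =====
-- def split_jungle_chapters(text):
--     """Split Jungle Book into stories using blank-line-surrounded titles."""
--     titles = {
--         "Mowgli's Brothers",
--         "Hunting-Song of the Seeonee Pack",
--         "Kaa's Hunting",
--         "Road-Song of the Bandar-Log",
--         "\"Tiger! Tiger!\"",
--         "Tiger! Tiger!",
--         "Mowgli's Song",
--         "The White Seal",
--         "Lukannon",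
--         "\"Rikki-Tikki-Tavi\"",
--         "Rikki-Tikki-Tavi",
--         "Darzee's Chaunt",
--         "Darzee's Chant",
--         "Toomai of the Elephants",
--         "Shiv and the Grasshopper",
--         "Her Majesty's Servants",
--         "Parade Song of the Camp Animals",
--         "Parade-Song of the Camp-Animals",
--     }
--
--     # One ordered pass over the text: at every newline, the just-finished line
--     # is a boundary iff it is a known title, is preceded by a newline
--     # (line_start > 0) and has not been seen before.  The boundary recorded is
--     # the index of the newline *before* the title, so the list comes out
--     # already sorted by position.
--     positions = []
--     seen = set()
--     line_start = 0
--     for i, ch in enumerate(text):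
--         if ch == '\n':
--             line = text[line_start:i]
--             if line_start > 0 and line in titles and line not in seen:
--                 seen.add(line)
--                 positions.append((line_start - 1, line))
--             line_start = i + 1
--
--     if not positions:
--         # Fallback: single chapter
--         return [{'title': 'The Jungle Book', 'text': text}]
--
--     ends = [p for p, _ in positions[1:]] + [len(text)]
--     chapters = []
--     for (pos, title), end in zip(positions, ends):
--         body = text[pos + len(title) + 2:end].strip()
--         if body:
--             chapters.append({'title': title.strip('"'), 'text': body})
--     return chapters
-- ===== Notes on version B (the rewrite author's own statement) =====
-- stated objective: alternative
-- what changed: Replaces the 18 separate text.find scans plus a sort by a single ordered line-by-line pass that keeps a running offset and a seen-set, so the boundary list is produced already sorted; the chapter slicing is then driven by zipping each boundary with the next instead of indexing positions[i+1] inside an enumerate loop.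
import Mathlib
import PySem

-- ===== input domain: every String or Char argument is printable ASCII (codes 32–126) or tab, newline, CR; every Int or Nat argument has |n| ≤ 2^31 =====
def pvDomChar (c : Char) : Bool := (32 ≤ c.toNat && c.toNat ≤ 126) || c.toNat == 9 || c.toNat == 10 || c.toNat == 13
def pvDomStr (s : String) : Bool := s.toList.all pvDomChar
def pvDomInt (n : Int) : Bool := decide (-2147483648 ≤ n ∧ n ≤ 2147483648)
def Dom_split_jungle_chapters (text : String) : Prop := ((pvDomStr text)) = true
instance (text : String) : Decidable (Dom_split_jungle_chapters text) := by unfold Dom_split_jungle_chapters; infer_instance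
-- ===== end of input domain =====

-- B replaces A's 18 text.find scans + sort by one ordered line-scan with a running
-- offset (objective: alternative decomposition, same observable result).

-- ===== PORT A =====
def jbStoryTitles : List String := [
  "Mowgli's Brothers",
  "Hunting-Song of the Seeonee Pack",
  "Kaa's Hunting",
  "Road-Song of the Bandar-Log",
  "\"Tiger! Tiger!\"",
  "Tiger! Tiger!",
  "Mowgli's Song",
  "The White Seal",
  "Lukannon",
  "\"Rikki-Tikki-Tavi\"",
  "Rikki-Tikki-Tavi",
  "Darzee's Chaunt",
  "Darzee's Chant",
  "Toomai of the Elephants",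
  "Shiv and the Grasshopper",
  "Her Majesty's Servants",
  "Parade Song of the Camp Animals",
  "Parade-Song of the Camp-Animals"]

-- 'for title in story_titles: idx = text.find(f"\n{title}\n"); if idx != -1: positions.append((idx, title))'
def jbFindPositions (s : List Char) : List (Int × String) :=
  jbStoryTitles.foldl (fun acc title =>
    let idx := PySem.Chars.find s ('\n' :: (title.toList ++ ['\n']))
    if idx ≠ -1 then acc ++ [(idx, title)] else acc) []

-- the 'for i, (pos, title) in enumerate(positions)' slicing loop of A
def jbBuildA (s : List Char) (positions : List (Int × String)) : List (List (String × String)) :=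
  (PySem.List.enumerate positions).foldl (fun chapters x =>
    let start := x.2.1 + (x.2.2.toList.length : Int) + 2
    let stop := if x.1 + 1 < (positions.length : Int)
                then (PySem.List.pyGetD positions (x.1 + 1) (0, "")).1
                else (s.length : Int)
    let body := PySem.Chars.strip (PySem.List.slice s (some start) (some stop))
    if body ≠ [] then
      chapters ++ [[("title", String.ofList (PySem.Chars.stripChars x.2.2.toList ['"'])),
                    ("text", String.ofList body)]]
    else chapters) []

def split_jungle_chapters (text : String) : List (List (String × String)) :=
  let positions := jbFindPositions text.toList
  let positions := PySem.List.sorted positions (fun x => x.1)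
  if positions = [] then
    [[("title", "The Jungle Book"), ("text", text)]]
  else
    jbBuildA text.toList positions

-- ===== PORT B =====
def jbTitleSetL : PySem.Set (List Char) :=
  PySem.Set.ofList ([
    "Mowgli's Brothers",
    "Hunting-Song of the Seeonee Pack",
    "Kaa's Hunting",
    "Road-Song of the Bandar-Log",
    "\"Tiger! Tiger!\"",
    "Tiger! Tiger!",
    "Mowgli's Song",
    "The White Seal",
    "Lukannon",
    "\"Rikki-Tikki-Tavi\"",
    "Rikki-Tikki-Tavi",
    "Darzee's Chaunt",
    "Darzee's Chant",
    "Toomai of the Elephants",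
    "Shiv and the Grasshopper",
    "Her Majesty's Servants",
    "Parade Song of the Camp Animals",
    "Parade-Song of the Camp-Animals"].map String.toList)

-- 'for i, ch in enumerate(text): if ch == "\n": …' — one pass with a running line_start
def jbScan (s : List Char) : List Char → Nat → Nat → PySem.Set (List Char) →
    List (Int × List Char) → List (Int × List Char)
  | [], _, _, _, positions => positions
  | ch :: rest, i, lineStart, seen, positions =>
    if ch = '\n' then
      let line := PySem.List.slice s (some (lineStart : Int)) (some (i : Int))
      if 0 < lineStart ∧ line ∈ jbTitleSetL ∧ ¬ line ∈ seen then
        jbScan s rest (i + 1) (i + 1) (seen.add line)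
          (positions ++ [((lineStart : Int) - 1, line)])
      else
        jbScan s rest (i + 1) (i + 1) seen positions
    else
      jbScan s rest (i + 1) lineStart seen positions

-- 'ends = [p for p, _ in positions[1:]] + [len(text)]; for (pos, title), end in zip(positions, ends): …'
def jbBuildB (s : List Char) (positions : List (Int × List Char)) : List (List (String × String)) :=
  let ends := (positions.drop 1).map (fun p => p.1) ++ [(s.length : Int)]
  (positions.zip ends).foldl (fun chapters x =>
    let body := PySem.Chars.strip
      (PySem.List.slice s (some (x.1.1 + (x.1.2.length : Int) + 2)) (some x.2))
    if body ≠ [] then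
      chapters ++ [[("title", String.ofList (PySem.Chars.stripChars x.1.2 ['"'])),
                    ("text", String.ofList body)]]
    else chapters) []

def split_jungle_chapters_alt (text : String) : List (List (String × String)) :=
  let s := text.toList
  let positions := jbScan s s 0 0 (PySem.Set.ofList []) []
  if positions = [] then
    [[("title", "The Jungle Book"), ("text", text)]]
  else
    jbBuildB s positions

-- ===== PRECONDITION & SPEC =====
def Spec_split_jungle_chapters (text : String) (out : List (List (String × String))) : Prop := out = split_jungle_chapters_alt text
instance (text : String) (out : List (List (String × String))) : Decidable (Spec_split_jungle_chapters text out) := by unfold Spec_split_jungle_chapters; infer_instance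

-- ===== CLAIM (what is proved, stated in full; the proofs are below) =====
def Claim_equal_split_jungle_chapters : Prop := ∀ (text : String), Dom_split_jungle_chapters text → Spec_split_jungle_chapters text (split_jungle_chapters text)

-- ===== LEMMAS AND PROOFS =====

-- the search pattern of A: '\n' + title + '\n'
def jbPat (t : List Char) : List Char := '\n' :: (t ++ ['\n'])

-- 'the pattern for t occurs at index q of s'
def jbOcc (s t : List Char) (q : Nat) : Prop := jbPat t <+: s.drop q

-- 'q is the FIRST occurrence of the pattern for t'
def jbFirst (s t : List Char) (q : Nat) : Prop := jbOcc s t q ∧ ∀ q' < q, ¬ jbOcc s t q'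

lemma jbOcc_decomp {s t : List Char} {q : Nat} (h : jbOcc s t q) :
    ∃ r, s.drop q = '\n' :: (t ++ '\n' :: r) := by
  obtain ⟨r, hr⟩ := h
  exact ⟨r, by rw [← hr]; simp [jbPat]⟩

lemma jbOcc_open {s t : List Char} {q : Nat} (h : jbOcc s t q) : s[q]? = some '\n' := by
  obtain ⟨r, hr⟩ := jbOcc_decomp h
  have h0 : (s.drop q)[0]? = some '\n' := by rw [hr]; rfl
  simpa using h0

lemma jbOcc_closing {s t : List Char} {q : Nat} (h : jbOcc s t q) :
    s[q + t.length + 1]? = some '\n' := by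
  obtain ⟨r, hr⟩ := jbOcc_decomp h
  have h0 : (s.drop q)[t.length + 1]? = some '\n' := by
    rw [hr]
    simp
  rw [List.getElem?_drop] at h0
  simpa [Nat.add_comm, Nat.add_assoc, Nat.add_left_comm] using h0

lemma jbOcc_body {s t : List Char} {q : Nat} (h : jbOcc s t q) :
    (s.drop (q + 1)).take t.length = t := by
  obtain ⟨r, hr⟩ := jbOcc_decomp h
  have : s.drop (q + 1) = t ++ '\n' :: r := by
    have := congrArg (List.drop 1) hr
    simpa [List.drop_drop, Nat.add_comm] using this
  rw [this]
  simpa using List.take_left t ('\n' :: r)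

lemma jbOcc_intro {s t r : List Char} {q : Nat} (h1 : s[q]? = some '\n')
    (h2 : s.drop (q + 1) = t ++ '\n' :: r) : jbOcc s t q := by
  have hq : q < s.length := by
    by_contra hq
    simp [List.getElem?_eq_none (le_of_not_gt hq)] at h1
  refine ⟨r, ?_⟩
  have hd : s.drop q = s[q] :: s.drop (q + 1) := List.drop_eq_getElem_cons hq
  have hv : s[q] = '\n' := by
    have := List.getElem?_eq_getElem hq
    rw [h1] at this; exact (Option.some_inj.mp this.symm)
  rw [hd, hv, h2, jbPat]
  simp

lemma jbOcc_mem_between {s t : List Char} {q j : Nat} {c : Char} (h : jbOcc s t q)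
    (hj1 : q + 1 ≤ j) (hj2 : j < q + 1 + t.length) (hc : s[j]? = some c) : c ∈ t := by
  have hb := jbOcc_body h
  have : t[j - (q + 1)]? = some c := by
    rw [← hb]
    rw [List.getElem?_take, List.getElem?_drop]
    simp only [if_pos (by omega : j - (q+1) < t.length)]
    rw [(by omega : q + 1 + (j - (q + 1)) = j)]
    exact hc
  exact List.mem_of_getElem? this

lemma jbFirst_unique {s t : List Char} {q q' : Nat} (h : jbFirst s t q)
    (h' : jbFirst s t q') : q = q' := by
  rcases Nat.lt_trichotomy q q' with hlt | heq | hgt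
  · exact absurd h.1 (h'.2 q hlt)
  · exact heq
  · exact absurd h'.1 (h.2 q' hgt)

lemma jbFirst_of_occ {s t : List Char} {q' : Nat} (h : jbOcc s t q') :
    ∃ q, q ≤ q' ∧ jbFirst s t q := by
  classical
  have hex : ∃ n, jbOcc s t n := ⟨q', h⟩
  exact ⟨Nat.find hex, Nat.find_min' hex h, Nat.find_spec hex,
    fun m hm => Nat.find_min hex hm⟩

lemma jbTitles_no_newline : ∀ t ∈ jbTitleSetL, '\n' ∉ t := by decide

lemma jbTitles_nodup : jbStoryTitles.Nodup := by decide

-- a recorded occurrence has both its newlines strictly before lineStart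
lemma jbOcc_bound {s t : List Char} {q i lineStart : Nat}
    (hnl : ∀ j, lineStart ≤ j → j < i → s[j]? ≠ some '\n')
    (hilen : s.length ≤ i) (h : jbOcc s t q) : q + t.length + 2 ≤ lineStart := by
  have hcl := jbOcc_closing h
  have hlen : q + t.length + 1 < s.length := (List.getElem?_eq_some_iff.mp hcl).1
  by_contra hb
  exact hnl (q + t.length + 1) (by omega) (by omega) hcl

-- a new occurrence completed exactly at the newline s[i] must be the current line
lemma jbNew {s t : List Char} {q i lineStart : Nat} (hle : lineStart ≤ i)
    (hnl : ∀ j, lineStart ≤ j → j < i → s[j]? ≠ some '\n')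
    (hstart : lineStart = 0 ∨ s[lineStart - 1]? = some '\n')
    (htn : '\n' ∉ t)
    (hocc : jbOcc s t q) (hgt : lineStart < q + t.length + 2)
    (hlt : q + t.length + 2 ≤ i + 1) :
    q = lineStart - 1 ∧ 0 < lineStart ∧ t = (s.drop lineStart).take (i - lineStart) := by
  have hcl := jbOcc_closing hocc
  have hop := jbOcc_open hocc
  -- the closing newline is at i
  have hpi : q + t.length + 1 = i := by
    by_contra hne
    exact hnl (q + t.length + 1) (by omega) (by omega) hcl
  -- the opening newline is before lineStart
  have hqlt : q < lineStart := by
    by_contra hq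
    exact hnl q (by omega) (by omega) hop
  have hls0 : 0 < lineStart := by omega
  -- q cannot be earlier than lineStart - 1, else '\n' ∈ t
  have hq : q = lineStart - 1 := by
    by_contra hne
    have h1 : q + 1 ≤ lineStart - 1 := by omega
    rcases hstart with h0 | hsn
    · omega
    · exact htn (jbOcc_mem_between hocc h1 (by omega) hsn)
  refine ⟨hq, hls0, ?_⟩
  have hb := jbOcc_body hocc
  have hlen : t.length = i - lineStart := by omega
  rw [← hb, hlen, (by omega : q + 1 = lineStart)]

lemma jbScan_spec (s : List Char) :
    ∀ (rest : List Char) (i lineStart : Nat) (seen : PySem.Set (List Char))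
      (acc : List (Int × List Char)),
    s.drop i = rest →
    lineStart ≤ i →
    (∀ j, lineStart ≤ j → j < i → s[j]? ≠ some '\n') →
    (lineStart = 0 ∨ s[lineStart - 1]? = some '\n') →
    (∀ t, t ∈ seen ↔ t ∈ jbTitleSetL ∧ ∃ q, jbFirst s t q ∧ q + t.length + 2 ≤ lineStart) →
    (∀ x : Int × List Char, x ∈ acc ↔ x.2 ∈ jbTitleSetL ∧
        ∃ q, jbFirst s x.2 q ∧ q + x.2.length + 2 ≤ lineStart ∧ x.1 = (q : Int)) →
    acc.Pairwise (fun a b => a.1 < b.1) →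
    (∀ x : Int × List Char, x ∈ jbScan s rest i lineStart seen acc ↔
        x.2 ∈ jbTitleSetL ∧ ∃ q, jbFirst s x.2 q ∧ x.1 = (q : Int)) ∧
      (jbScan s rest i lineStart seen acc).Pairwise (fun a b => a.1 < b.1) := by
  intro rest
  induction rest with
  | nil =>
    intro i lineStart seen acc hdrop hle hnl hstart hseen hacc hpair
    have hilen : s.length ≤ i := by
      have := congrArg List.length hdrop
      simp at this
      omega
    rw [jbScan]
    refine ⟨?_, hpair⟩
    intro x
    rw [hacc x]
    constructor
    · rintro ⟨hset, q, hfirst, _, hq⟩; exact ⟨hset, q, hfirst, hq⟩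
    · rintro ⟨hset, q, hfirst, hq⟩
      exact ⟨hset, q, hfirst, jbOcc_bound hnl hilen hfirst.1, hq⟩
  | cons c rest ih =>
    intro i lineStart seen acc hdrop hle hnl hstart hseen hacc hpair
    have hi : s[i]? = some c := by
      have h0 : (s.drop i)[0]? = some c := by rw [hdrop]; rfl
      simpa using h0
    have hilt : i < s.length := (List.getElem?_eq_some_iff.mp hi).1
    have hdrop' : s.drop (i + 1) = rest := by
      have := congrArg (List.drop 1) hdrop
      simpa [List.drop_drop, Nat.add_comm] using this
    by_cases hc : c = '\n'
    · subst hc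
      have hslice : PySem.List.slice s (some (lineStart : Int)) (some (i : Int)) =
          List.take (i - lineStart) (List.drop lineStart s) :=
        PySem.List.slice_natCast s lineStart i
      set L := List.take (i - lineStart) (List.drop lineStart s) with hL
      have hdropLS : List.drop lineStart s = L ++ '\n' :: rest := by
        conv_lhs => rw [← List.take_append_drop (i - lineStart) (List.drop lineStart s)]
        rw [List.drop_drop, (by omega : lineStart + (i - lineStart) = i), hdrop]
      have hLlen : L.length = i - lineStart := by
        rw [hL]
        simp
        omega
      have hLnl : '\n' ∉ L := by
        intro hmem
        obtain ⟨k, hk, hkeq⟩ := List.getElem_of_mem hmem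
        have h1 : s[lineStart + k]? = some '\n' := by
          have h2 : L[k]? = some '\n' := by rw [List.getElem?_eq_getElem hk, hkeq]
          rw [hL, List.getElem?_take, List.getElem?_drop] at h2
          rwa [if_pos (by omega)] at h2
        exact hnl (lineStart + k) (by omega) (by omega) h1
      rw [jbScan]
      rw [if_pos rfl]
      simp only [hslice]
      by_cases hrec : 0 < lineStart ∧ L ∈ jbTitleSetL ∧ ¬ L ∈ seen
      · rw [if_pos hrec]
        obtain ⟨hls0, hLset, hLseen⟩ := hrec
        have hstart' : s[lineStart - 1]? = some '\n' := hstart.resolve_left (by omega)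
        have hoccL : jbOcc s L (lineStart - 1) := by
          apply jbOcc_intro hstart'
          rw [(by omega : lineStart - 1 + 1 = lineStart)]
          exact hdropLS
        have hfirstL : jbFirst s L (lineStart - 1) := by
          refine ⟨hoccL, ?_⟩
          intro q' hq' hocc'
          obtain ⟨q0, hq0, hfirst0⟩ := jbFirst_of_occ hocc'
          have hcl := jbOcc_closing hfirst0.1
          have hb : q0 + L.length + 2 ≤ lineStart := by
            by_contra hb
            exact hnl (q0 + L.length + 1) (by omega) (by omega) hcl
          exact hLseen ((hseen L).mpr ⟨hLset, q0, hfirst0, hb⟩)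
        have hcast : (lineStart : Int) - 1 = ((lineStart - 1 : Nat) : Int) := by omega
        apply ih (i + 1) (i + 1) _ _ hdrop' (le_refl _)
          (by intro j h1 h2; omega)
          (Or.inr (by simpa using hi))
        · intro t
          rw [PySem.Set.mem_add]
          constructor
          · rintro (ht | rfl)
            · obtain ⟨hset, q, hf, hb⟩ := (hseen t).mp ht
              exact ⟨hset, q, hf, by omega⟩
            · exact ⟨hLset, lineStart - 1, hfirstL, by omega⟩
          · rintro ⟨hset, q, hf, hb⟩
            by_cases hble : q + t.length + 2 ≤ lineStart
            · exact Or.inl ((hseen t).mpr ⟨hset, q, hf, hble⟩)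
            · right
              obtain ⟨hq, _, hteq⟩ :=
                jbNew hle hnl hstart (jbTitles_no_newline t hset) hf.1 (by omega) hb
              exact hteq
        · intro x
          obtain ⟨x1, x2⟩ := x
          rw [List.mem_append, List.mem_singleton]
          constructor
          · rintro (hmem | heq)
            · obtain ⟨hset, q, hf, hb, hx⟩ := (hacc _).mp hmem
              exact ⟨hset, q, hf, by omega, hx⟩
            · rw [Prod.mk.injEq] at heq
              obtain ⟨h1, h2⟩ := heq
              refine ⟨by rw [h2]; exact hLset, lineStart - 1,
                by rw [h2]; exact hfirstL, ?_, ?_⟩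
              · show lineStart - 1 + x2.length + 2 ≤ i + 1
                have hl2 : x2.length = L.length := by rw [h2]
                omega
              · show x1 = ((lineStart - 1 : Nat) : Int)
                rw [h1]
                omega
          · rintro ⟨hset, q, hf, hb, hx⟩
            have hb' : q + x2.length + 2 ≤ i + 1 := hb
            have hx' : x1 = (q : Int) := hx
            by_cases hble : q + x2.length + 2 ≤ lineStart
            · exact Or.inl ((hacc _).mpr ⟨hset, q, hf, hble, hx⟩)
            · right
              obtain ⟨hq, _, hteq⟩ :=
                jbNew hle hnl hstart (jbTitles_no_newline x2 hset) hf.1 (by omega) hb'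
              rw [Prod.mk.injEq]
              refine ⟨?_, hteq⟩
              show x1 = (lineStart : Int) - 1
              rw [hx', hq]
              omega
        · rw [List.pairwise_append]
          refine ⟨hpair, List.pairwise_singleton _ _, ?_⟩
          intro a ha b hb
          rw [List.mem_singleton] at hb
          subst hb
          obtain ⟨_, q, _, hbound, hq⟩ := (hacc a).mp ha
          show a.1 < (lineStart : Int) - 1
          rw [hq]
          omega
      · rw [if_neg hrec]
        have hkey : ∀ t, t ∈ jbTitleSetL → ∀ q, jbFirst s t q → q + t.length + 2 ≤ i + 1 →
            q + t.length + 2 ≤ lineStart := by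
          intro t hset q hf hb
          by_contra hble
          obtain ⟨hq, hls0, hteq⟩ :=
            jbNew hle hnl hstart (jbTitles_no_newline t hset) hf.1 (by omega) hb
          have htL : t = L := hteq
          have hLset : L ∈ jbTitleSetL := htL ▸ hset
          have hLseen : L ∈ seen := by
            by_contra hns
            exact hrec ⟨hls0, hLset, hns⟩
          obtain ⟨_, q2, hf2, hb2⟩ := (hseen L).mp hLseen
          have hqq : q = q2 := jbFirst_unique (htL ▸ hf) hf2
          have hlen : t.length = L.length := by rw [htL]
          omega
        apply ih (i + 1) (i + 1) _ _ hdrop' (le_refl _)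
          (by intro j h1 h2; omega)
          (Or.inr (by simpa using hi))
        · intro t
          rw [hseen t]
          constructor
          · rintro ⟨hset, q, hf, hb⟩; exact ⟨hset, q, hf, by omega⟩
          · rintro ⟨hset, q, hf, hb⟩
            exact ⟨hset, q, hf, hkey t hset q hf hb⟩
        · intro x
          rw [hacc x]
          constructor
          · rintro ⟨hset, q, hf, hb, hx⟩; exact ⟨hset, q, hf, by omega, hx⟩
          · rintro ⟨hset, q, hf, hb, hx⟩
            exact ⟨hset, q, hf, hkey x.2 hset q hf hb, hx⟩
        · exact hpair
    · rw [jbScan]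
      rw [if_neg hc]
      apply ih (i + 1) lineStart seen acc hdrop' (by omega) ?_ hstart hseen hacc hpair
      intro j h1 h2
      rcases (by omega : j < i ∨ j = i) with h | h
      · exact hnl j h1 h
      · subst h
        rw [hi]
        simp [hc]

-- closed form of A's find loop
lemma jbFindPositions_eq (s : List Char) :
    jbFindPositions s =
      (jbStoryTitles.filter
        (fun t => !(PySem.Chars.find s (jbPat t.toList) == -1))).map
        (fun t => (PySem.Chars.find s (jbPat t.toList), t)) := by
  unfold jbFindPositions
  have h : (fun (acc : List (Int × String)) (title : String) =>
        let idx := PySem.Chars.find s ('\n' :: (title.toList ++ ['\n']))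
        if idx ≠ -1 then acc ++ [(idx, title)] else acc) =
      (fun acc title =>
        if (!(PySem.Chars.find s (jbPat title.toList) == -1)) = true
        then acc ++ [(PySem.Chars.find s (jbPat title.toList), title)] else acc) := by
    funext acc title
    by_cases hc : PySem.Chars.find s ('\n' :: (title.toList ++ ['\n'])) = -1 <;>
      simp [jbPat, hc]
  rw [h, PySem.List.foldl_append_if]
  simp

-- find = p (p ≠ -1)  ↔  p is the first occurrence
lemma jbFind_iff_first (s t : List Char) (p : Int) :
    (PySem.Chars.find s (jbPat t) = p ∧ p ≠ -1) ↔ ∃ q : Nat, jbFirst s t q ∧ p = (q : Int) := by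
  constructor
  · rintro ⟨hf, hne⟩
    have h0 : 0 ≤ PySem.Chars.find s (jbPat t) := by
      have := PySem.Chars.neg_one_le_find s (jbPat t)
      omega
    obtain ⟨hocc, hmin⟩ := PySem.Chars.find_spec h0
    refine ⟨(PySem.Chars.find s (jbPat t)).toNat, ⟨hocc, fun q' hq' => hmin q' hq'⟩, ?_⟩
    rw [← hf]
    omega
  · rintro ⟨q, ⟨hocc, hmin⟩, hp⟩
    have hinf : jbPat t <:+: s := by
      rw [← PySem.Chars.isIn_iff_infix]
      exact (PySem.Chars.exists_prefix_drop_iff_isIn _ _).mp ⟨q, hocc⟩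
    have hne : PySem.Chars.find s (jbPat t) ≠ -1 := by
      rw [PySem.Chars.find_ne_neg_one_iff]
      exact hinf
    have h0 : 0 ≤ PySem.Chars.find s (jbPat t) := by
      have := PySem.Chars.neg_one_le_find s (jbPat t)
      omega
    obtain ⟨hocc2, hmin2⟩ := PySem.Chars.find_spec h0
    have heq : (PySem.Chars.find s (jbPat t)).toNat = q := by
      rcases Nat.lt_trichotomy (PySem.Chars.find s (jbPat t)).toNat q with h | h | h
      · exact absurd hocc2 (hmin _ h)
      · exact h
      · exact absurd hocc (hmin2 q h)
    refine ⟨?_, ?_⟩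
    · rw [hp, ← heq]
      omega
    · rw [hp]
      omega

-- the sorted find list IS the scan output (read back as strings)
lemma jbSorted_eq_scan (s : List Char) :
    PySem.List.sorted (jbFindPositions s) (fun x => x.1) =
      (jbScan s s 0 0 (PySem.Set.ofList []) []).map (fun y => (y.1, String.ofList y.2)) := by
  obtain ⟨hmem, hpair⟩ := jbScan_spec s s 0 0 (PySem.Set.ofList []) [] rfl (le_refl 0)
    (by intro j h1 h2; omega) (Or.inl rfl)
    (by
      intro t
      constructor
      · intro h
        rw [PySem.Set.mem_ofList] at h
        simp at h
      · rintro ⟨_, q, _, hb⟩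
        omega)
    (by
      intro x
      constructor
      · intro h
        simp at h
      · rintro ⟨_, q, _, hb, _⟩
        omega)
    List.Pairwise.nil
  apply PySem.List.sorted_eq_of_perm_of_pairwise_lt
  · have hnodB : ((jbScan s s 0 0 (PySem.Set.ofList []) []).map
        (fun y => (y.1, String.ofList y.2))).Nodup := by
      apply List.Pairwise.imp (show ∀ {a b : Int × String}, a.1 < b.1 → a ≠ b by
        intro a b h hab
        rw [hab] at h
        omega)
      rw [List.pairwise_map]
      exact hpair
    have hnodA : (jbFindPositions s).Nodup := by
      rw [jbFindPositions_eq]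
      apply List.Nodup.map
      · intro a b hab
        have := congrArg Prod.snd hab
        exact this
      · exact jbTitles_nodup.filter _
    rw [List.perm_ext_iff_of_nodup hnodB hnodA]
    intro a
    rw [List.mem_map, jbFindPositions_eq, List.mem_map]
    constructor
    · rintro ⟨y, hy, hback⟩
      obtain ⟨hset, q, hf, hq⟩ := (hmem y).mp hy
      have hset' := hset
      rw [jbTitleSetL, PySem.Set.mem_ofList, List.mem_map] at hset'
      obtain ⟨u, hu, hul⟩ := hset'
      refine ⟨u, ?_, ?_⟩
      · rw [List.mem_filter]
        refine ⟨hu, ?_⟩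
        have : (PySem.Chars.find s (jbPat u.toList) = (q : Int) ∧ ((q : Int) : Int) ≠ -1) := by
          apply (jbFind_iff_first s u.toList (q : Int)).mpr
          exact ⟨q, by rw [hul]; exact hf, rfl⟩
        simp [this.1]
      · have hfind : PySem.Chars.find s (jbPat u.toList) = (q : Int) := by
          have := (jbFind_iff_first s u.toList (q : Int)).mpr ⟨q, by rw [hul]; exact hf, rfl⟩
          exact this.1
        rw [← hback, hfind, ← hq]
        rw [Prod.mk.injEq]
        exact ⟨rfl, by rw [← hul]; simp⟩
    · rintro ⟨u, hu, hua⟩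
      rw [List.mem_filter] at hu
      obtain ⟨humem, hufind⟩ := hu
      have hne : PySem.Chars.find s (jbPat u.toList) ≠ -1 := by
        simpa using hufind
      obtain ⟨q, hf, hq⟩ :=
        (jbFind_iff_first s u.toList (PySem.Chars.find s (jbPat u.toList))).mp ⟨rfl, hne⟩
      refine ⟨((q : Int), u.toList), ?_, ?_⟩
      · apply (hmem _).mpr
        refine ⟨?_, q, hf, rfl⟩
        rw [jbTitleSetL, PySem.Set.mem_ofList, List.mem_map]
        exact ⟨u, humem, rfl⟩
      · rw [← hua, Prod.mk.injEq]
        exact ⟨by rw [hq], by simp⟩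
  · rw [List.pairwise_map]
    exact hpair

-- the two slicing loops agree on any boundary list
lemma jbBuild_eq (s : List Char) (ps : List (Int × String)) :
    jbBuildA s ps = jbBuildB s (ps.map (fun x => (x.1, x.2.toList))) := by
  have hzip : (ps.map (fun x => (x.1, x.2.toList))).zip
        (((ps.map (fun x => (x.1, x.2.toList))).drop 1).map (fun p => p.1) ++ [(s.length : Int)]) =
      (PySem.List.enumerate ps).map (fun y =>
        ((y.2.1, y.2.2.toList),
         if y.1 + 1 < (ps.length : Int)
         then (PySem.List.pyGetD ps (y.1 + 1) (0, "")).1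
         else (s.length : Int))) := by
    apply List.ext_getElem
    · simp [List.length_zip, PySem.List.length_enumerate]
      omega
    · intro k h1 h2
      have hk : k < ps.length := by
        simpa [PySem.List.length_enumerate] using h2
      simp only [List.getElem_zip, List.getElem_map, PySem.List.getElem_enumerate]
      rw [Prod.mk.injEq]
      constructor
      · rfl
      · rw [List.getElem_append]
        by_cases hlt : k + 1 < ps.length
        · rw [dif_pos (by simp; omega)]
          rw [if_pos (by push_cast; omega)]
          rw [List.getElem_map, List.getElem_drop]
          rw [PySem.List.pyGetD_eq_getElem ps (0, "") (by omega) (by push_cast; omega)]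
          have hidx : ((0 : Int) + (k : Int) + 1).toNat = k + 1 := by omega
          simp only [hidx]
          simp [Nat.add_comm]
        · rw [dif_neg (by simp; omega)]
          rw [if_neg (by push_cast; omega)]
          simp
  unfold jbBuildA jbBuildB
  show _ = List.foldl _ []
    ((ps.map (fun x => (x.1, x.2.toList))).zip
      (((ps.map (fun x => (x.1, x.2.toList))).drop 1).map (fun p => p.1) ++ [(s.length : Int)]))
  rw [hzip, List.foldl_map]

-- ===== VERDICT (by name: the statement is the Claim_ definition above) =====
theorem split_jungle_chapters_spec : Claim_equal_split_jungle_chapters := by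
  intro text _
  simp only [Spec_split_jungle_chapters, split_jungle_chapters, split_jungle_chapters_alt]
  rw [jbSorted_eq_scan text.toList]
  by_cases hB : jbScan text.toList text.toList 0 0 (PySem.Set.ofList []) [] = []
  · rw [hB]
    simp
  · rw [if_neg (by simpa using hB), if_neg hB, jbBuild_eq, List.map_map]
    congr 1
    conv_rhs => rw [← List.map_id (jbScan text.toList text.toList 0 0 (PySem.Set.ofList []) [])]
    apply List.map_congr_left
    intro y _
    simp
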